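-- pv_equiv track=rewrite | github.com/chandraharsha4807/Python-Practices | practice678.py | getMinJumps
-- ===== SOURCE A (Python) =====
-- def getMinJumps(s):
-- 	# Store all indices
-- 	ones = []
-- 	jumps, median, ind = 0, 0, 0
-- 	# Populating one's indices
-- 	for i in range(len(s)):
-- 		if(s[i] == '1'):
-- 			ones.append(i)
--
-- 	if(len(ones) == 0):
-- 		return jumps
-- 	# Calculate median
-- 	median = ones[len(ones) // 2]
-- 	ind = median
-- 	# Jumps required for 1's
-- 	# to the left of median
-- 	for i in range(ind, -1, -1):
-- 		if(s[i] == '1'):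
-- 			jumps += ind - i
-- 			ind -= 1
--
-- 	ind = median
-- 	# Jumps required for 1's
-- 	# to the right of median
-- 	for i in range(ind, len(s)):
-- 		if(s[i] == '1'):
-- 			jumps += i - ind
-- 			ind += 1
-- 	# Return the final answer
-- 	return jumps
-- ===== SOURCE B (Python) =====
-- def getMinJumps(s):
-- 	ones = [i for i, c in enumerate(s) if c == '1']
-- 	if not ones:
-- 		return 0
-- 	b = [p - i for i, p in enumerate(ones)]
-- 	m = b[len(b) // 2]
-- 	return sum(abs(x - m) for x in b)
-- ===== Notes on version B (the rewrite author's own statement) =====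
-- stated objective: simpler
-- what changed: B replaces A's two stateful directional string scans (left and right of the median position) by one comprehension collecting the positions of set characters, the classic b[i]=ones[i]-i normalization, and a single sum of absolute deviations from the median of b.
import Mathlib
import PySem

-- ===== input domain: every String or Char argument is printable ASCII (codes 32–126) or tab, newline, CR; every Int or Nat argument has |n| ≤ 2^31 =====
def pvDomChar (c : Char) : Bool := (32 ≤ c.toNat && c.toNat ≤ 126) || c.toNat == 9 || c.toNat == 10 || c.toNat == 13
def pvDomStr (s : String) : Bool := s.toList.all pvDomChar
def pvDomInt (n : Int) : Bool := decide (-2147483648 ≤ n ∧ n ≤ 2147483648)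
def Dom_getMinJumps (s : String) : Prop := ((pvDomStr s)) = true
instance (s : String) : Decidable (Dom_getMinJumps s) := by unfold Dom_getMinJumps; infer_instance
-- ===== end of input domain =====

-- B replaces A's two directional string scans by the classic one-pass `ones[i]-i` median trick
-- (simpler decomposition; same return value, no side effects in either version).

-- ===== PORT A =====
def getMinJumps (s : String) : Int :=
  let cs := s.toList
  let ones : List Int := (PySem.List.pyRange 0 (cs.length : Int) 1).foldl
      (fun acc i => if PySem.List.pyGetD cs i ' ' == '1' then acc ++ [i] else acc) []
  if ones.length = 0 then 0
  else
    let median : Int := PySem.List.pyGetD ones (PySem.Int.floordiv (ones.length : Int) 2) 0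
    let left := (PySem.List.pyRange median (-1) (-1)).foldl
        (fun (st : Int × Int) i =>
          if PySem.List.pyGetD cs i ' ' == '1' then (st.1 + (st.2 - i), st.2 - 1) else st)
        (0, median)
    let right := (PySem.List.pyRange median (cs.length : Int) 1).foldl
        (fun (st : Int × Int) i =>
          if PySem.List.pyGetD cs i ' ' == '1' then (st.1 + (i - st.2), st.2 + 1) else st)
        (left.1, median)
    right.1

-- ===== PORT B =====
def getMinJumps_alt (s : String) : Int :=
  let ones : List Int :=
    ((PySem.List.enumerate s.toList 0).filter (fun p => p.2 == '1')).map (fun p => p.1)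
  if ones.isEmpty then 0
  else
    let b : List Int := (PySem.List.enumerate ones 0).map (fun p => p.2 - p.1)
    let m : Int := PySem.List.pyGetD b (PySem.Int.floordiv (b.length : Int) 2) 0
    (b.map (fun x => |x - m|)).sum

-- ===== PRECONDITION & SPEC =====
def Spec_getMinJumps (s : String) (out : Int) : Prop := out = getMinJumps_alt s
instance (s : String) (out : Int) : Decidable (Spec_getMinJumps s out) := by
  unfold Spec_getMinJumps; infer_instance

-- ===== CLAIM (what is proved, stated in full; the proofs are below) =====
def Claim_equal_getMinJumps : Prop := ∀ (s : String), Dom_getMinJumps s → Spec_getMinJumps s (getMinJumps s)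

-- ===== LEMMAS AND PROOFS =====

/-- The character test both programs make at string position `i`. -/
def pvQ (cs : List Char) (i : Nat) : Bool := cs.getD i ' ' == '1'

/-- Positions of '1' in `cs`, ascending. -/
def pvOnes (cs : List Char) : List Nat := (List.range cs.length).filter (pvQ cs)

/-- Jumps accumulated by A's LEFT loop on a DESCENDING list of one-positions,
    target pointer starting at `d` and moving down. -/
def pvGL : List Int → Int → Int
  | [], _ => 0
  | p :: t, d => (d - p) + pvGL t (d - 1)

/-- Jumps accumulated by A's RIGHT loop on an ASCENDING list of one-positions,
    target pointer starting at `d` and moving up. -/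
def pvGR : List Int → Int → Int
  | [], _ => 0
  | p :: t, d => (p - d) + pvGR t (d + 1)

theorem pvOnes_pairwise (cs : List Char) : (pvOnes cs).Pairwise (· < ·) :=
  List.Pairwise.sublist List.filter_sublist List.pairwise_lt_range

theorem pvOnes_lt_length (cs : List Char) {x : Nat} (hx : x ∈ pvOnes cs) : x < cs.length :=
  List.mem_range.mp (List.mem_filter.mp hx).1

theorem pv_mono (l : List Nat) (hl : l.Pairwise (· < ·)) :
    ∀ (d i : Nat) (h : i + d < l.length), l[i]'(by omega) + d ≤ l[i + d]'h := by
  intro d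
  induction d with
  | zero => intro i h; simp
  | succ d ih =>
    intro i h
    have h1 := ih i (by omega)
    have h2 : l[i + d]'(by omega) < l[i + d + 1]'(by omega) :=
      List.pairwise_iff_getElem.mp hl (i + d) (i + d + 1) (by omega) (by omega) (by omega)
    have h3 : l[i + (d + 1)]'h = l[i + d + 1]'(by omega) := rfl
    omega

theorem pv_filter_le_take (l : List Nat) (hl : l.Pairwise (· < ·)) (k : Nat) (hk : k < l.length) :
    l.filter (fun x => decide (x ≤ l[k])) = l.take (k + 1) := by
  rw [show l.filter (fun x => decide (x ≤ l[k])) =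
      ((l.take (k + 1) ++ l.drop (k + 1)).filter (fun x => decide (x ≤ l[k]))) from by
    rw [List.take_append_drop]]
  rw [List.filter_append]
  have h1 : (l.take (k + 1)).filter (fun x => decide (x ≤ l[k])) = l.take (k + 1) := by
    apply List.filter_eq_self.mpr
    intro x hx
    rcases List.mem_iff_getElem.mp hx with ⟨j, hj, rfl⟩
    have hjlen : j < k + 1 := by
      have := hj; simp [List.length_take] at this; omega
    rw [List.getElem_take]
    simp only [decide_eq_true_eq]
    rcases Nat.lt_or_ge j k with hjk | hjk
    · have := List.pairwise_iff_getElem.mp hl j k (by omega) hk hjk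
      omega
    · have : j = k := by omega
      subst this; omega
  have h2 : (l.drop (k + 1)).filter (fun x => decide (x ≤ l[k])) = [] := by
    apply List.filter_eq_nil_iff.mpr
    intro x hx
    rcases List.mem_iff_getElem.mp hx with ⟨j, hj, rfl⟩
    rw [List.getElem_drop]
    have := List.pairwise_iff_getElem.mp hl k (k + 1 + j) hk (by simp at hj; omega) (by omega)
    simp only [decide_eq_true_eq]
    omega
  rw [h1, h2, List.append_nil]

theorem pv_filter_ge_drop (l : List Nat) (hl : l.Pairwise (· < ·)) (k : Nat) (hk : k < l.length) :
    l.filter (fun x => decide (l[k] ≤ x)) = l.drop k := by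
  rw [show l.filter (fun x => decide (l[k] ≤ x)) =
      ((l.take k ++ l.drop k).filter (fun x => decide (l[k] ≤ x))) from by
    rw [List.take_append_drop]]
  rw [List.filter_append]
  have h1 : (l.take k).filter (fun x => decide (l[k] ≤ x)) = [] := by
    apply List.filter_eq_nil_iff.mpr
    intro x hx
    rcases List.mem_iff_getElem.mp hx with ⟨j, hj, rfl⟩
    have hjk : j < k := by simp [List.length_take] at hj; omega
    rw [List.getElem_take]
    have := List.pairwise_iff_getElem.mp hl j k (by omega) hk hjk
    simp only [decide_eq_true_eq]
    omega
  have h2 : (l.drop k).filter (fun x => decide (l[k] ≤ x)) = l.drop k := by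
    apply List.filter_eq_self.mpr
    intro x hx
    rcases List.mem_iff_getElem.mp hx with ⟨j, hj, rfl⟩
    rw [List.getElem_drop]
    simp only [decide_eq_true_eq]
    rcases Nat.eq_zero_or_pos j with rfl | hj0
    · simp
    · have := List.pairwise_iff_getElem.mp hl k (k + j) hk (by simp at hj; omega) (by omega)
      omega
  rw [h1, h2, List.nil_append]

theorem pv_filter_range_le (q : Nat → Bool) {M n : Nat} (h : M < n) :
    (List.range (M + 1)).filter q = ((List.range n).filter q).filter (fun x => decide (x ≤ M)) := by
  symm
  rw [List.filter_filter]
  conv_lhs => rw [show n = (M + 1) + (n - (M + 1)) from by omega]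
  rw [List.range_add, List.filter_append]
  have h1 : (List.range (M + 1)).filter (fun a => decide (a ≤ M) && q a) =
      (List.range (M + 1)).filter q := by
    apply List.filter_congr
    intro x hx
    simp only [List.mem_range] at hx
    have : x ≤ M := by omega
    simp [this]
  have h2 : (((List.range (n - (M + 1))).map (M + 1 + ·)).filter
      (fun a => decide (a ≤ M) && q a)) = [] := by
    apply List.filter_eq_nil_iff.mpr
    intro x hx
    rcases List.mem_map.mp hx with ⟨y, _, rfl⟩
    simp only [Bool.and_eq_true, decide_eq_true_eq, not_and]
    intro hc
    omega
  rw [h1, h2, List.append_nil]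

theorem pvGL_append_singleton (v : List Int) (a : Int) :
    ∀ c, pvGL (v ++ [a]) c = pvGL v c + (c - v.length - a) := by
  induction v with
  | nil => intro c; simp [pvGL]
  | cons p t ih =>
    intro c
    simp only [List.cons_append, pvGL, ih (c - 1), List.length_cons]
    push_cast
    ring

theorem pvGL_rev_enum (u : List Int) :
    ∀ (c s : Int), pvGL u.reverse c
      = ((PySem.List.enumerate u s).map (fun q => c - u.length + 1 - s + q.1 - q.2)).sum := by
  induction u with
  | nil => intro c s; simp [pvGL, PySem.List.enumerate]
  | cons a t ih =>
    intro c s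
    rw [List.reverse_cons, pvGL_append_singleton, PySem.List.enumerate_cons]
    simp only [List.map_cons, List.sum_cons, List.length_reverse, List.length_cons]
    rw [ih c (s + 1)]
    have : ((PySem.List.enumerate t (s + 1)).map (fun q => c - t.length + 1 - (s + 1) + q.1 - q.2))
        = ((PySem.List.enumerate t (s + 1)).map (fun q => c - ((t.length + 1 : Nat) : Int) + 1 - s + q.1 - q.2)) := by
      apply List.map_congr_left
      intro q _
      push_cast
      ring
    rw [← this]
    push_cast
    ring

theorem pvGR_enum (v : List Int) :
    ∀ (c s : Int), pvGR v c
      = ((PySem.List.enumerate v s).map (fun q => q.2 - (c - s + q.1))).sum := by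
  induction v with
  | nil => intro c s; simp [pvGR, PySem.List.enumerate]
  | cons a t ih =>
    intro c s
    rw [PySem.List.enumerate_cons]
    simp only [pvGR, List.map_cons, List.sum_cons]
    rw [ih (c + 1) (s + 1)]
    have : ((PySem.List.enumerate t (s + 1)).map (fun q => q.2 - (c + 1 - (s + 1) + q.1)))
        = ((PySem.List.enumerate t (s + 1)).map (fun q => q.2 - (c - s + q.1))) := by
      apply List.map_congr_left
      intro q _
      ring
    rw [this]
    ring

theorem pv_left_eq (ON : List Nat) (hp : ON.Pairwise (· < ·)) (k : Nat) (hk : k < ON.length) :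
    pvGL (((ON.map (fun (i : Nat) => (i : Int))).take (k + 1)).reverse) ((ON[k] : Int))
      = ((PySem.List.enumerate ((ON.map (fun (i : Nat) => (i : Int))).take (k + 1)) 0).map
          (fun q => |q.2 - q.1 - ((ON[k] : Int) - (k : Int))|)).sum := by
  set O := ON.map (fun (i : Nat) => (i : Int)) with hO
  have hlen : (O.take (k + 1)).length = k + 1 := by
    simp [hO, List.length_take]
    omega
  rw [pvGL_rev_enum (O.take (k + 1)) ((ON[k] : Int)) 0]
  apply congrArg List.sum
  apply List.map_congr_left
  intro q hq
  rcases (PySem.List.mem_enumerate_iff _ _ _).mp hq with ⟨j, hj, rfl⟩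
  rw [hlen] at hj
  have hval : (O.take (k + 1))[j]'(by rw [hlen]; omega) = ((ON[j]'(by omega) : Int)) := by
    rw [List.getElem_take]
    simp [hO]
  have hmono : ON[j]'(by omega) + (k - j) ≤ ON[k] := by
    have := pv_mono ON hp (k - j) j (by omega)
    have e : j + (k - j) = k := by omega
    simp only [e] at this
    exact this
  simp only [hval, hlen]
  rw [abs_of_nonpos (by omega)]
  push_cast
  ring

theorem pv_right_eq (ON : List Nat) (hp : ON.Pairwise (· < ·)) (k : Nat) (hk : k < ON.length) :
    pvGR ((ON.map (fun (i : Nat) => (i : Int))).drop k) ((ON[k] : Int))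
      = ((PySem.List.enumerate ((ON.map (fun (i : Nat) => (i : Int))).drop (k + 1)) ((k : Int) + 1)).map
          (fun q => |q.2 - q.1 - ((ON[k] : Int) - (k : Int))|)).sum := by
  set O := ON.map (fun (i : Nat) => (i : Int)) with hO
  have hOlen : O.length = ON.length := by simp [hO]
  have hcons : O.drop k = O[k]'(by omega) :: O.drop (k + 1) := (List.getElem_cons_drop ..).symm
  have hOk : O[k]'(by omega) = ((ON[k] : Int)) := by simp [hO]
  rw [hcons, hOk]
  show ((ON[k] : Int) - (ON[k] : Int)) + pvGR (O.drop (k + 1)) ((ON[k] : Int) + 1) = _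
  rw [pvGR_enum (O.drop (k + 1)) ((ON[k] : Int) + 1) ((k : Int) + 1)]
  rw [sub_self, zero_add]
  apply congrArg List.sum
  apply List.map_congr_left
  intro q hq
  rcases (PySem.List.mem_enumerate_iff _ _ _).mp hq with ⟨j, hj, rfl⟩
  simp only [List.length_drop] at hj
  have hval : (O.drop (k + 1))[j]'(by simp [List.length_drop]; omega)
      = ((ON[k + 1 + j]'(by omega) : Int)) := by
    rw [List.getElem_drop]
    simp [hO]
  have hmono : ON[k] + (1 + j) ≤ ON[k + 1 + j]'(by omega) := by
    have := pv_mono ON hp (1 + j) k (by omega)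
    have e : k + (1 + j) = k + 1 + j := by omega
    simp only [e] at this
    exact this
  simp only [hval]
  rw [abs_of_nonneg (by omega)]
  ring

theorem pvQ_bridge (cs : List Char) (i : Nat) :
    (PySem.List.pyGetD cs (i : Int) ' ' == '1') = pvQ cs i := by
  simp [pvQ, PySem.List.pyGetD_natCast]

theorem pv_leftLoop (cs : List Char) :
    ∀ (m : Nat) (j d : Int),
    (PySem.List.pyRange (m : Int) (-1) (-1)).foldl
        (fun (st : Int × Int) i =>
          if PySem.List.pyGetD cs i ' ' == '1' then (st.1 + (st.2 - i), st.2 - 1) else st)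
        (j, d)
      = (j + pvGL ((((List.range (m + 1)).filter (pvQ cs)).map (fun (i : Nat) => (i : Int))).reverse) d,
         d - (((List.range (m + 1)).filter (pvQ cs)).length : Int)) := by
  intro m
  induction m with
  | zero =>
    intro j d
    rw [PySem.List.pyRange_neg_one_cons (by norm_num)]
    rw [show ((0 : Nat) : Int) - 1 = -1 from by norm_num]
    rw [PySem.List.pyRange_neg_one_eq_nil (le_refl _)]
    simp only [List.foldl_cons, List.foldl_nil]
    rw [pvQ_bridge cs 0]
    cases hq : pvQ cs 0 with
    | true => simp [hq, pvGL]
    | false => simp [hq, pvGL]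
  | succ m ih =>
    intro j d
    rw [PySem.List.pyRange_neg_one_cons (by push_cast; omega)]
    rw [show (((m + 1 : Nat)) : Int) - 1 = (m : Int) from by push_cast; ring]
    rw [List.foldl_cons]
    rw [pvQ_bridge cs (m + 1)]
    rw [show List.range (m + 1 + 1) = List.range (m + 1) ++ [m + 1] from List.range_succ]
    rw [List.filter_append, List.filter_cons, List.filter_nil]
    cases hq : pvQ cs (m + 1) with
    | true =>
      simp only [if_true]
      rw [ih (j + (d - ((m + 1 : Nat) : Int))) (d - 1)]
      simp only [List.map_append, List.reverse_append, List.map_cons, List.map_nil,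
        List.reverse_cons, List.reverse_nil, List.nil_append, List.cons_append,
        List.length_append, List.length_cons, List.length_nil]
      simp only [pvGL]
      refine Prod.ext ?_ ?_
      · push_cast; ring
      · push_cast; ring
    | false =>
      simp only [Bool.false_eq_true, if_false]
      rw [ih j d]
      simp only [List.append_nil]

theorem pvGR_append_singleton (v : List Int) (a : Int) :
    ∀ c, pvGR (v ++ [a]) c = pvGR v c + (a - (c + v.length)) := by
  induction v with
  | nil => intro c; simp [pvGR]
  | cons p t ih =>
    intro c
    simp only [List.cons_append, pvGR, ih (c + 1), List.length_cons]
    push_cast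
    ring

theorem pv_rightLoop (cs : List Char) (M : Nat) :
    ∀ (t : Nat) (j d : Int),
    (PySem.List.pyRange (M : Int) ((M + t : Nat) : Int) 1).foldl
        (fun (st : Int × Int) i =>
          if PySem.List.pyGetD cs i ' ' == '1' then (st.1 + (i - st.2), st.2 + 1) else st)
        (j, d)
      = (j + pvGR (((List.range (M + t)).filter (fun i => pvQ cs i && decide (M ≤ i))).map
            (fun (i : Nat) => (i : Int))) d,
         d + (((List.range (M + t)).filter (fun i => pvQ cs i && decide (M ≤ i))).length : Int)) := by
  intro t
  induction t with
  | zero =>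
    intro j d
    rw [show ((M + 0 : Nat) : Int) = (M : Int) from by push_cast; ring]
    rw [PySem.List.pyRange_one_eq_nil (le_refl _)]
    have hnil : (List.range (M + 0)).filter (fun i => pvQ cs i && decide (M ≤ i)) = [] := by
      apply List.filter_eq_nil_iff.mpr
      intro x hx
      simp only [List.mem_range] at hx
      simp only [Bool.and_eq_true, decide_eq_true_eq, not_and]
      intro _
      omega
    rw [hnil]
    simp [pvGR]
  | succ t ih =>
    intro j d
    rw [show ((M + (t + 1) : Nat) : Int) = ((M + t : Nat) : Int) + 1 from by push_cast; ring]
    rw [PySem.List.pyRange_one_succ_right (by push_cast; omega)]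
    rw [List.foldl_append, ih j d, List.foldl_cons, List.foldl_nil]
    rw [pvQ_bridge cs (M + t)]
    rw [show M + (t + 1) = (M + t) + 1 from rfl]
    rw [show List.range ((M + t) + 1) = List.range (M + t) ++ [M + t] from List.range_succ]
    rw [List.filter_append, List.filter_cons, List.filter_nil]
    rw [show decide (M ≤ M + t) = true from by simp]
    cases hq : pvQ cs (M + t) with
    | true =>
      simp only [Bool.true_and, if_true]
      simp only [List.map_append, List.map_cons, List.map_nil, List.length_append,
        List.length_cons, List.length_nil]
      rw [pvGR_append_singleton]
      simp only [List.length_map]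
      refine Prod.ext ?_ ?_
      · push_cast; ring
      · push_cast; ring
    | false =>
      simp only [Bool.false_and, Bool.false_eq_true, if_false, List.append_nil]

theorem pv_ones_A (cs : List Char) :
    (PySem.List.pyRange 0 (cs.length : Int) 1).foldl
      (fun acc i => if PySem.List.pyGetD cs i ' ' == '1' then acc ++ [i] else acc) []
    = (pvOnes cs).map (fun (i : Nat) => (i : Int)) := by
  rw [PySem.List.foldl_append_if_eq_filter]
  rw [PySem.List.pyRange_zero_nat]
  rw [List.filter_map]
  simp only [List.nil_append, pvOnes]
  congr 1
  apply List.filter_congr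
  intro x _
  exact pvQ_bridge cs x

theorem pv_ones_B (cs : List Char) :
    ((PySem.List.enumerate cs 0).filter (fun p => p.2 == '1')).map (fun p => p.1)
    = (pvOnes cs).map (fun (i : Nat) => (i : Int)) := by
  rw [PySem.List.enumerate_eq_map_pyRange cs ' ']
  rw [show PySem.List.len cs = (cs.length : Int) from by simp]
  rw [PySem.List.pyRange_zero_nat]
  rw [List.map_map, List.filter_map, List.map_map]
  simp only [pvOnes, Function.comp_def]
  congr 1
  apply List.filter_congr
  intro x _
  exact pvQ_bridge cs x


-- ===== VERDICT (by name: the statement is the Claim_ definition above) =====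
theorem getMinJumps_spec : Claim_equal_getMinJumps := by
  intro s _
  show getMinJumps s = getMinJumps_alt s
  rw [getMinJumps, getMinJumps_alt]
  simp only [pv_ones_A, pv_ones_B]
  set ON := pvOnes s.toList with hON
  by_cases hL : ON.length = 0
  · simp [List.length_eq_zero_iff.mp hL]
  · have hpw : ON.Pairwise (· < ·) := hON ▸ pvOnes_pairwise s.toList
    have hLpos : 0 < ON.length := Nat.pos_of_ne_zero hL
    have hk : ON.length / 2 < ON.length := Nat.div_lt_self hLpos one_lt_two
    simp only [List.length_map, PySem.List.length_enumerate]
    rw [if_neg hL]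
    rw [show (List.map (fun (i : Nat) => (i : Int)) ON).isEmpty = false from by
      simp [← List.length_eq_zero_iff]
      omega]
    simp only [Bool.false_eq_true, if_false]
    rw [show (2 : Int) = ((2 : Nat) : Int) from by norm_num]
    rw [show PySem.Int.floordiv ((ON.length : Int)) ((2 : Nat) : Int)
        = ((ON.length / 2 : Nat) : Int) from PySem.Int.floordiv_natCast ON.length 2]
    set k := ON.length / 2 with hkdef
    have hMn : ON[k]'hk < s.toList.length :=
      pvOnes_lt_length s.toList (hON ▸ List.getElem_mem hk)
    have hmed : PySem.List.pyGetD (List.map (fun (i : Nat) => (i : Int)) ON) ((k : Int)) 0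
        = ((ON[k]'hk : Nat) : Int) := by
      rw [PySem.List.pyGetD_natCast]
      rw [List.getD_eq_getElem _ _ (by simpa using hk)]
      simp
    have hbk : PySem.List.pyGetD
        (List.map (fun p => p.2 - p.1) (PySem.List.enumerate (List.map (fun (i : Nat) => (i : Int)) ON)))
        ((k : Int)) 0 = ((ON[k]'hk : Nat) : Int) - (k : Int) := by
      rw [PySem.List.pyGetD_natCast]
      rw [List.getD_eq_getElem _ _ (by simp [PySem.List.length_enumerate]; omega)]
      rw [List.getElem_map, PySem.List.getElem_enumerate]
      simp
    rw [hmed, hbk]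
    rw [pv_leftLoop s.toList (ON[k]'hk) 0 ((ON[k]'hk : Nat) : Int)]
    rw [show ((s.toList.length : Nat) : Int)
        = (((ON[k]'hk + (s.toList.length - ON[k]'hk) : Nat)) : Int) from by
      rw [Nat.add_sub_cancel' hMn.le]]
    rw [pv_rightLoop s.toList (ON[k]'hk) (s.toList.length - ON[k]'hk)]
    have hfe : (List.range s.toList.length).filter (pvQ s.toList) = ON := by rw [hON]; rfl
    have hQL : (List.range (ON[k]'hk + 1)).filter (pvQ s.toList) = ON.take (k + 1) := by
      rw [pv_filter_range_le (pvQ s.toList) hMn, hfe]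
      exact pv_filter_le_take ON hpw k hk
    have hW : (List.range (ON[k]'hk + (s.toList.length - ON[k]'hk))).filter
        (fun i => pvQ s.toList i && decide (ON[k]'hk ≤ i)) = ON.drop k := by
      rw [Nat.add_sub_cancel' hMn.le]
      rw [List.filter_congr (fun x _ => Bool.and_comm (pvQ s.toList x) (decide (ON[k]'hk ≤ x)))]
      rw [← List.filter_filter, hfe]
      exact pv_filter_ge_drop ON hpw k hk
    rw [hQL, hW]
    simp only [List.map_take, List.map_drop]
    rw [pv_left_eq ON hpw k hk, pv_right_eq ON hpw k hk]
    have hsplit : PySem.List.enumerate (ON.map (fun (i : Nat) => (i : Int))) 0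
        = PySem.List.enumerate ((ON.map (fun (i : Nat) => (i : Int))).take (k + 1)) 0
          ++ PySem.List.enumerate ((ON.map (fun (i : Nat) => (i : Int))).drop (k + 1)) ((k : Int) + 1) := by
      have hlt : ((ON.map (fun (i : Nat) => (i : Int))).take (k + 1)).length = k + 1 := by
        simp only [List.length_take, List.length_map]
        omega
      conv_lhs => rw [← List.take_append_drop (k + 1) (ON.map (fun (i : Nat) => (i : Int)))]
      rw [PySem.List.enumerate_append, hlt]
      rw [show ((0 : Int) + (((k + 1 : Nat)) : Int)) = ((k : Int) + 1) from by push_cast; ring]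
    rw [List.map_map, hsplit, List.map_append, List.sum_append]
    simp only [Function.comp_def]
    ring
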